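-- pv_equiv track=rewrite | github.com/rayklauck/Beweissystem | main.py | k_aus
-- ===== SOURCE A (Python) =====
-- def k_aus(set,k):
--     if k==0:
--         return [[]]
--
--     hinten = k_aus(set,k-1)
--
--     ergs = []
--     for i in set:
--         for h in hinten:
--             ergs.append([i]+h)
--     return ergs
-- ===== SOURCE B (Python) =====
-- def k_aus(set, k):
--     acc = [[]]
--     for _ in range(k):
--         acc = [[i] + h for i in set for h in acc]
--     return acc
-- ===== Notes on version B (the rewrite author's own statement) =====
-- stated objective: simpler
-- what changed: Replaces the recursion on k with an iterative accumulator: start from [[]] and k times prepend each element of set to every accumulated tuple, in the same nesting order.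
import Mathlib
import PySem

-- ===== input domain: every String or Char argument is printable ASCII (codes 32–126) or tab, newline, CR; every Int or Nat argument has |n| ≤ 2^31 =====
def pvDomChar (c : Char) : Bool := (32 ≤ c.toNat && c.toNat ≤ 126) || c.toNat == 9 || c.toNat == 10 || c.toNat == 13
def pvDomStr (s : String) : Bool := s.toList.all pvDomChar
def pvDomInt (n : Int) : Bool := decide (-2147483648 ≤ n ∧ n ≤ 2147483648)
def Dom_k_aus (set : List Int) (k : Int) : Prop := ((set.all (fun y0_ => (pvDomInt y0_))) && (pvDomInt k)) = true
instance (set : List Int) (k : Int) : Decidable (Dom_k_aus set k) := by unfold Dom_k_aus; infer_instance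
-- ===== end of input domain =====

-- B replaces A's recursion on k with an iterative accumulator loop; return values only, no speed claim.

-- ===== PORT A =====
-- A recurses on k; the Int recursion is realised on k.toNat (for k < 0 Python diverges, excluded by Pre_).
def k_ausNat (set : List Int) : Nat → List (List Int)
  | 0 => [[]]
  | n + 1 =>
    let hinten := k_ausNat set n
    set.foldl (fun ergs i => hinten.foldl (fun e h => e ++ [i :: h]) ergs) []

def k_aus (set : List Int) (k : Int) : List (List Int) :=
  if k == 0 then [[]] else k_ausNat set k.toNat

-- ===== PORT B =====
def k_aus_alt (set : List Int) (k : Int) : List (List Int) :=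
  (List.range k.toNat).foldl (fun acc _ => set.flatMap (fun i => acc.map (fun h => i :: h))) [[]]

-- ===== PRECONDITION & SPEC =====
-- Pre_ excludes k < 0, where A recurses without bound (RecursionError).
def Pre_k_aus (set : List Int) (k : Int) : Prop := 0 ≤ k
instance (set : List Int) (k : Int) : Decidable (Pre_k_aus set k) := by unfold Pre_k_aus; infer_instance
def pvWitness_k_aus : List Int × Int := ([1, 2], 2)

def Spec_k_aus (set : List Int) (k : Int) (out : List (List Int)) : Prop := out = k_aus_alt set k
instance (set : List Int) (k : Int) (out : List (List Int)) : Decidable (Spec_k_aus set k out) := by unfold Spec_k_aus; infer_instance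

-- ===== CLAIM =====
def Claim_equal_k_aus : Prop := ∀ (set : List Int) (k : Int), Dom_k_aus set k → Pre_k_aus set k → Spec_k_aus set k (k_aus set k)

-- ===== LEMMAS AND PROOFS =====
theorem inner_foldl_eq (hinten : List (List Int)) (i : Int) (ergs : List (List Int)) :
    hinten.foldl (fun e h => e ++ [i :: h]) ergs = ergs ++ hinten.map (fun h => i :: h) := by
  induction hinten generalizing ergs with
  | nil => simp
  | cons h t ih => simp [List.foldl, ih]

theorem k_ausNat_eq_alt (set : List Int) (n : Nat) :
    k_ausNat set n = (List.range n).foldl (fun acc _ => set.flatMap (fun i => acc.map (fun h => i :: h))) [[]] := by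
  induction n with
  | zero => simp [k_ausNat]
  | succ n ih =>
    rw [List.range_succ, List.foldl_append, ← ih]
    simp only [List.foldl_cons, List.foldl_nil]
    show k_ausNat set (n + 1) = _
    rw [k_ausNat]
    have : ∀ (acc : List (List Int)) (s : List Int),
        s.foldl (fun ergs i => (k_ausNat set n).foldl (fun e h => e ++ [i :: h]) ergs) acc
          = acc ++ s.flatMap (fun i => (k_ausNat set n).map (fun h => i :: h)) := by
      intro acc s
      induction s generalizing acc with
      | nil => simp
      | cons a t iht =>
        rw [List.foldl_cons, inner_foldl_eq, iht, List.flatMap_cons, List.append_assoc]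
    simpa using this [] set

-- ===== VERDICT =====
theorem k_aus_spec : Claim_equal_k_aus := by
  intro set k _ hk
  unfold Spec_k_aus k_aus k_aus_alt
  split
  · rename_i h
    have : k = 0 := by exact_mod_cast (by simpa using h : k = 0)
    subst this
    simp
  · exact k_ausNat_eq_alt set k.toNat
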